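-- pv_equiv track=rewrite | github.com/Alexd-y/argus | backend/src/reports/replay_command_sanitizer.py | _redact_password_flag_values
-- ===== SOURCE A (Python) =====
-- from typing import Final
--
-- REDACTED_PASSWORD: Final[str] = "[REDACTED-PASSWORD]"
--
-- _PASSWORD_FLAGS: Final[frozenset[str]] = frozenset(
--     {
--         "--password",
--         "--pwd",
--         "--passwd",
--         "-p",
--         "--token",
--         "--api-key",
--         "--bearer",
--         "--secret",
--         "--client-secret",
--     }
-- )
--
-- def _redact_password_flag_values(argv: list[str]) -> list[str]:
--     """Replace the value following a ``--password`` / ``-p`` flag.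
--
--     Handles three shapes:
--
--     * ``--password VALUE`` / ``-p VALUE`` (split across two argv tokens).
--     * ``-p=VALUE`` / ``--token=VALUE`` (single token, ``=`` separator).
--     * ``-p:VALUE`` (single token, ``:`` separator).
--
--     The flag itself is preserved so the operator can still see the shape
--     of the original command — only the credential value is redacted.
--     """
--     if not argv:
--         return argv
--     out = list(argv)
--     for idx, token in enumerate(out):
--         for flag in _PASSWORD_FLAGS:
--             for sep in ("=", ":"):
--                 marker = f"{flag}{sep}"
--                 if token.startswith(marker) and len(token) > len(marker):
--                     out[idx] = f"{flag}{sep}{REDACTED_PASSWORD}"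
--                     break
--             else:
--                 continue
--             break
--     for idx in range(len(out) - 1):
--         flag = out[idx]
--         if flag in _PASSWORD_FLAGS:
--             out[idx + 1] = REDACTED_PASSWORD
--     return out
-- ===== SOURCE B (Python) =====
-- from typing import Final
--
-- REDACTED_PASSWORD: Final[str] = "[REDACTED-PASSWORD]"
--
-- _PASSWORD_FLAGS: Final[frozenset[str]] = frozenset(
--     {
--         "--password",
--         "--pwd",
--         "--passwd",
--         "-p",
--         "--token",
--         "--api-key",
--         "--bearer",
--         "--secret",
--         "--client-secret",
--     }
-- )
--
-- # precomputed flag+separator markers (each token can match at most one: no marker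
-- # is a prefix of another), in a fixed order
-- _MARKERS: Final[tuple[str, ...]] = tuple(
--     flag + sep
--     for flag in ("--password", "--pwd", "--passwd", "-p", "--token",
--                  "--api-key", "--bearer", "--secret", "--client-secret")
--     for sep in ("=", ":")
-- )
--
--
-- def _redact_password_flag_values(argv: list[str]) -> list[str]:
--     """Single left-to-right pass with a redact-next flag."""
--     out: list[str] = []
--     redact_next = False
--     for token in argv:
--         if redact_next:
--             out.append(REDACTED_PASSWORD)
--             redact_next = False
--         elif token in _PASSWORD_FLAGS:
--             out.append(token)
--             redact_next = True
--         else: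
--             for marker in _MARKERS:
--                 if token.startswith(marker) and len(token) > len(marker):
--                     out.append(marker + REDACTED_PASSWORD)
--                     break
--             else:
--                 out.append(token)
--     return out
-- ===== Notes on version B (the rewrite author's own statement) =====
-- stated objective: simpler
-- what changed: Replaced A's two separate passes (a nested flag/sep inline rewrite pass followed by a bare-flag next-token overwrite pass) with a single left-to-right traversal carrying a redact-next flag and a precomputed marker list; the redact-next state skips the marker scan entirely for redacted value tokens.
import Mathlib
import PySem

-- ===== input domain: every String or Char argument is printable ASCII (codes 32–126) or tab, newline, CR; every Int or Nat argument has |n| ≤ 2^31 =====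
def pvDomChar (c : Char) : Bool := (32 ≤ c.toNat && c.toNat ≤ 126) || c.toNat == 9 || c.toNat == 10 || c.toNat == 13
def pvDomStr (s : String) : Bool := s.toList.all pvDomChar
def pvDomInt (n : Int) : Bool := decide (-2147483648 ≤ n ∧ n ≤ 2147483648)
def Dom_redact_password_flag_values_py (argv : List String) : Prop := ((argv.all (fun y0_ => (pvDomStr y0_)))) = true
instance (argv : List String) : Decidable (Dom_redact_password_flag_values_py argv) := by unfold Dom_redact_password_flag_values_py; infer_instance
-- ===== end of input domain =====

-- B replaces A's two passes (inline-marker rewrite, then bare-flag value overwrite) by one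
-- stateful left-to-right traversal with a redact-next flag; objective: simpler, same cost.


-- ===== PORT A =====
def pvRED : String := "[REDACTED-PASSWORD]"

-- _PASSWORD_FLAGS as a list (frozenset iteration order is immaterial here: no two
-- flag+sep markers are comparable by prefix, so at most one can match a token)
def pvFlags : List String :=
  ["--password", "--pwd", "--passwd", "-p", "--token",
   "--api-key", "--bearer", "--secret", "--client-secret"]

-- A's first pass, inner two loops: first (flag, sep) whose marker is a proper prefix
def pvRedact1 (token : String) : List String → String
  | [] => token
  | f :: rest =>
    if PySem.Str.startswith token (f ++ "=") = true ∧ PySem.Str.len token > PySem.Str.len (f ++ "=") then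
      f ++ "=" ++ pvRED
    else if PySem.Str.startswith token (f ++ ":") = true ∧ PySem.Str.len token > PySem.Str.len (f ++ ":") then
      f ++ ":" ++ pvRED
    else pvRedact1 token rest

-- A's second pass: for idx in range(len(out)-1): if out[idx] in flags: out[idx+1] = RED
def pvPass2 : List String → List String
  | [] => []
  | [x] => [x]
  | x :: y :: rest =>
    if pvFlags.contains x then x :: pvPass2 (pvRED :: rest)
    else x :: pvPass2 (y :: rest)
termination_by xs => xs.length
decreasing_by all_goals (simp only [List.length_cons]; omega)

def redact_password_flag_values_py (argv : List String) : List String :=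
  if argv = [] then argv
  else pvPass2 (argv.map (fun t => pvRedact1 t pvFlags))

-- ===== PORT B =====
-- precomputed markers, fixed order (Source B's _MARKERS)
def pvMarkers : List String := pvFlags.flatMap (fun f => [f ++ "=", f ++ ":"])

-- Source B's inner for/else over _MARKERS: first matching marker, else the token itself
def pvInline (t : String) : String :=
  match pvMarkers.find? (fun m => PySem.Str.startswith t m && decide (PySem.Str.len t > PySem.Str.len m)) with
  | some m => m ++ pvRED
  | none => t

-- the single pass with the redact-next flag
def pvGo (redactNext : Bool) : List String → List String
  | [] => []
  | t :: rest =>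
    if redactNext then pvRED :: pvGo false rest
    else if pvFlags.contains t then t :: pvGo true rest
    else pvInline t :: pvGo false rest

def redact_password_flag_values_py_alt (argv : List String) : List String :=
  pvGo false argv

-- ===== PRECONDITION & SPEC =====
def Spec_redact_password_flag_values_py (argv : List String) (out : List String) : Prop := out = redact_password_flag_values_py_alt argv
instance (argv : List String) (out : List String) : Decidable (Spec_redact_password_flag_values_py argv out) := by unfold Spec_redact_password_flag_values_py; infer_instance

-- ===== CLAIM (what is proved, stated in full; the proofs are below) =====
def Claim_equal_redact_password_flag_values_py : Prop := ∀ (argv : List String), Dom_redact_password_flag_values_py argv → Spec_redact_password_flag_values_py argv (redact_password_flag_values_py argv)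

-- ===== LEMMAS AND PROOFS =====

-- A's nested flag/sep loops compute the first-match-over-markers that B's for/else computes
theorem pvRedact1_eq_find (t : String) : ∀ (fl : List String),
    pvRedact1 t fl =
      (match (fl.flatMap (fun f => [f ++ "=", f ++ ":"])).find?
          (fun m => PySem.Str.startswith t m && decide (PySem.Str.len t > PySem.Str.len m)) with
        | some m => m ++ pvRED
        | none => t)
  | [] => by simp [pvRedact1]
  | f :: rest => by
    have hfm : (f :: rest).flatMap (fun g => [g ++ "=", g ++ ":"])
        = (f ++ "=") :: (f ++ ":") :: rest.flatMap (fun g => [g ++ "=", g ++ ":"]) := by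
      simp
    rw [hfm]
    show (if PySem.Str.startswith t (f ++ "=") = true ∧ PySem.Str.len t > PySem.Str.len (f ++ "=") then
        f ++ "=" ++ pvRED
      else if PySem.Str.startswith t (f ++ ":") = true ∧ PySem.Str.len t > PySem.Str.len (f ++ ":") then
        f ++ ":" ++ pvRED
      else pvRedact1 t rest) = _
    by_cases h1 : PySem.Str.startswith t (f ++ "=") = true ∧ PySem.Str.len t > PySem.Str.len (f ++ "=")
    · rw [if_pos h1,
        List.find?_cons_of_pos (by rw [Bool.and_eq_true]; exact ⟨h1.1, decide_eq_true h1.2⟩)]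
    · have b1 : (PySem.Str.startswith t (f ++ "=") && decide (PySem.Str.len t > PySem.Str.len (f ++ "="))) = false := by
        rw [Bool.eq_false_iff]
        intro hb
        rw [Bool.and_eq_true] at hb
        exact h1 ⟨hb.1, of_decide_eq_true hb.2⟩
      rw [if_neg h1, List.find?_cons_of_neg (by rw [b1]; exact Bool.false_ne_true)]
      by_cases h2 : PySem.Str.startswith t (f ++ ":") = true ∧ PySem.Str.len t > PySem.Str.len (f ++ ":")
      · rw [if_pos h2,
          List.find?_cons_of_pos (by rw [Bool.and_eq_true]; exact ⟨h2.1, decide_eq_true h2.2⟩)]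
      · have b2 : (PySem.Str.startswith t (f ++ ":") && decide (PySem.Str.len t > PySem.Str.len (f ++ ":"))) = false := by
          rw [Bool.eq_false_iff]
          intro hb
          rw [Bool.and_eq_true] at hb
          exact h2 ⟨hb.1, of_decide_eq_true hb.2⟩
        rw [if_neg h2, List.find?_cons_of_neg (by rw [b2]; exact Bool.false_ne_true)]
        exact pvRedact1_eq_find t rest

theorem pvRedact1_eq_inline (t : String) : pvRedact1 t pvFlags = pvInline t := by
  rw [pvRedact1_eq_find t pvFlags]; rfl

-- the first pass leaves every bare flag unchanged
theorem pvRedact1_flag : ∀ f ∈ pvFlags, pvRedact1 f pvFlags = f := by decide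

-- the first pass returns the token itself or one of the 18 marker++RED forms
theorem pvRedact1_cases (t : String) : ∀ (fl : List String),
    pvRedact1 t fl = t ∨ pvRedact1 t fl ∈ fl.flatMap (fun f => [f ++ "=" ++ pvRED, f ++ ":" ++ pvRED])
  | [] => Or.inl rfl
  | f :: rest => by
    simp only [pvRedact1]
    split_ifs with h1 h2
    · right; simp
    · right; simp
    · rcases pvRedact1_cases t rest with h | h
      · exact Or.inl h
      · right; simp only [List.flatMap_cons, List.mem_append]
        exact Or.inr (by simpa using h)

-- no marker++RED form is a flag
theorem pvRedForms_not_flag : ∀ s ∈ pvFlags.flatMap (fun f => [f ++ "=" ++ pvRED, f ++ ":" ++ pvRED]),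
    pvFlags.contains s = false := by decide

theorem pvContains_redact1 (t : String) (h : pvFlags.contains t = false) :
    pvFlags.contains (pvRedact1 t pvFlags) = false := by
  rcases pvRedact1_cases t pvFlags with he | hm
  · rw [he]; exact h
  · exact pvRedForms_not_flag _ hm

theorem pvRED_not_flag : pvFlags.contains pvRED = false := by decide

theorem pvPass2_red (l : List String) : pvPass2 (pvRED :: l) = pvRED :: pvPass2 l := by
  cases l with
  | nil => simp [pvPass2]
  | cons z zs =>
    simp only [pvPass2]
    rw [if_neg (by rw [pvRED_not_flag]; exact Bool.false_ne_true)]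

theorem pvMain : ∀ (xs : List String),
    pvPass2 (xs.map (fun t => pvRedact1 t pvFlags)) = pvGo false xs
  | [] => by simp [pvPass2, pvGo]
  | [x] => by
    simp only [List.map_cons, List.map_nil, pvPass2, pvGo]
    rw [if_neg (by exact Bool.false_ne_true)]
    by_cases hx : pvFlags.contains x = true
    · rw [if_pos hx, pvRedact1_flag x (by simpa using hx)]
    · rw [if_neg hx, pvRedact1_eq_inline]
  | x :: y :: ys => by
    simp only [List.map_cons, pvGo]
    rw [if_neg (by exact Bool.false_ne_true)]
    by_cases hx : pvFlags.contains x = true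
    · rw [if_pos hx, pvRedact1_flag x (by simpa using hx)]
      simp only [pvPass2]
      rw [if_pos hx, pvPass2_red, pvMain ys]
      simp
    · rw [if_neg hx]
      have hrx : pvFlags.contains (pvRedact1 x pvFlags) = false :=
        pvContains_redact1 x (by simpa using hx)
      simp only [pvPass2]
      rw [if_neg (by rw [hrx]; exact Bool.false_ne_true), pvRedact1_eq_inline]
      have := pvMain (y :: ys)
      simp only [List.map_cons] at this
      rw [this]
      simp [pvGo]
termination_by xs => xs.length
decreasing_by all_goals simp

-- ===== VERDICT (by name: the statement is the Claim_ definition above) =====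
theorem redact_password_flag_values_py_spec : Claim_equal_redact_password_flag_values_py := by
  intro argv _
  unfold Spec_redact_password_flag_values_py redact_password_flag_values_py redact_password_flag_values_py_alt
  cases argv with
  | nil => simp [pvGo]
  | cons x xs =>
    rw [if_neg (by simp)]
    exact pvMain (x :: xs)
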